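-- pv_equiv track=rewrite | github.com/mines-opt-ml/decoding-gpt | dev/linear_probe.py | tokens_since_newline
-- ===== SOURCE A (Python) =====
-- def tokens_since_newline(tokens: list[str]) -> list[int]:
--     """Number of tokens since the most recent newline."""
--     count = 0
--     out = []
--     for t in tokens:
--         if "\n" in t:
--             count = 0
--         out.append(count)
--         count += 1
--     return out
-- ===== SOURCE B (Python) =====
-- def tokens_since_newline(tokens: list[str]) -> list[int]:
--     """Number of tokens since the most recent newline."""
--     newlines = [i for i, t in enumerate(tokens) if "\n" in t]
--     return [i - next((j for j in reversed(newlines) if j <= i), 0)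
--             for i in range(len(tokens))]
-- ===== Notes on version B (the rewrite author's own statement) =====
-- stated objective: alternative
-- what changed: Replaces the running reset-counter with a two-phase strategy: first build an index table of newline positions, then compute each entry as its distance to the most recent newline position found by a reverse scan of that table (defaulting to 0 before any newline).
import Mathlib
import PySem

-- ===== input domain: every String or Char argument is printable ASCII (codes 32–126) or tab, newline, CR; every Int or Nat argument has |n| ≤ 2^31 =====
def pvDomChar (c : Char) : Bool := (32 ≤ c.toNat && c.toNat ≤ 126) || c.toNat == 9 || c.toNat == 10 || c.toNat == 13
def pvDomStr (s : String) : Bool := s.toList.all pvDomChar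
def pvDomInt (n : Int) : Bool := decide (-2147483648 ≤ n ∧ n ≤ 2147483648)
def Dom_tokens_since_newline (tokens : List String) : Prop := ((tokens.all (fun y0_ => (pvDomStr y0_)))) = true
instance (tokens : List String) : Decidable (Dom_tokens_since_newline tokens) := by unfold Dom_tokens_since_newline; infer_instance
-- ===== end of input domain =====

-- B replaces A's running reset-counter with a newline-index table plus, per index, a reverse scan
-- of that table for the most recent newline position (alternative decomposition, not faster).


-- ===== PORT A =====
-- the loop 'for t in tokens: if "\n" in t: count = 0; out.append(count); count += 1'
-- as structural recursion over the same state (count; the appended-to out is the result list)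
def tokensA_go (count : Int) : List String → List Int
  | [] => []
  | t :: ts =>
    let c := if PySem.Str.isIn "\n" t then 0 else count
    c :: tokensA_go (c + 1) ts

def tokens_since_newline (tokens : List String) : List Int :=
  tokensA_go 0 tokens

-- ===== PORT B =====
def tokens_since_newline_alt (tokens : List String) : List Int :=
  let newlines : List Int :=
    ((PySem.List.enumerate tokens 0).filter (fun p => PySem.Str.isIn "\n" p.2)).map (fun p => p.1)
  (PySem.List.pyRange 0 tokens.length 1).map
    (fun i => i - ((newlines.reverse.find? (fun j => decide (j ≤ i))).getD 0))

-- ===== PRECONDITION & SPEC =====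
def Spec_tokens_since_newline (tokens : List String) (out : List Int) : Prop := out = tokens_since_newline_alt tokens
instance (tokens : List String) (out : List Int) : Decidable (Spec_tokens_since_newline tokens out) := by unfold Spec_tokens_since_newline; infer_instance

-- ===== CLAIM (what is proved, stated in full; the proofs are below) =====
def Claim_equal_tokens_since_newline : Prop := ∀ (tokens : List String), Dom_tokens_since_newline tokens → Spec_tokens_since_newline tokens (tokens_since_newline tokens)

-- ===== LEMMAS AND PROOFS =====

-- the newline-index table of B, generalized to an arbitrary enumeration start
def nlsS (s : Int) (ts : List String) : List Int :=
  ((PySem.List.enumerate ts s).filter (fun p => PySem.Str.isIn "\n" p.2)).map (fun p => p.1)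

lemma alt_eq (tokens : List String) :
    tokens_since_newline_alt tokens =
      (PySem.List.pyRange 0 tokens.length 1).map
        (fun i => i - (((nlsS 0 tokens).reverse.find? (fun j => decide (j ≤ i))).getD 0)) := rfl

lemma nlsS_cons (s : Int) (t : String) (ts : List String) :
    nlsS s (t :: ts) = (if PySem.Str.isIn "\n" t then [s] else []) ++ nlsS (s + 1) ts := by
  simp only [nlsS, PySem.List.enumerate_cons, List.filter_cons]
  split <;> simp_all

lemma mem_nlsS_le (s j : Int) (ts : List String) (h : j ∈ nlsS s ts) : s ≤ j := by
  simp only [nlsS, List.mem_map, List.mem_filter] at h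
  obtain ⟨p, ⟨hp, _⟩, rfl⟩ := h
  rw [PySem.List.mem_enumerate_iff] at hp
  obtain ⟨k, hk, rfl⟩ := hp
  simp

-- elementwise characterization of A's loop via B's table lookup
lemma tokensA_go_eq (ts : List String) : ∀ (s c : Int),
    tokensA_go c ts =
      (PySem.List.pyRange s (s + ts.length) 1).map
        (fun i => match (nlsS s ts).reverse.find? (fun j => decide (j ≤ i)) with
                  | some j => i - j
                  | none => c + (i - s)) := by
  induction ts with
  | nil =>
    intro s c
    rw [PySem.List.pyRange_one_eq_nil (by simp)]
    rfl
  | cons t ts ih =>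
    intro s c
    have hlt : s < s + (t :: ts).length := by simp
    rw [PySem.List.pyRange_one_cons hlt, List.map_cons, tokensA_go]
    have hrev : (nlsS s (t :: ts)).reverse
        = (nlsS (s + 1) ts).reverse ++ (if PySem.Str.isIn "\n" t then [s] else []) := by
      rw [nlsS_cons, List.reverse_append]
      split <;> rfl
    have hnone : ∀ i : Int, i ≤ s →
        (nlsS (s + 1) ts).reverse.find? (fun j => decide (j ≤ i)) = none := by
      intro i hi
      rw [List.find?_eq_none]
      intro j hj
      have := mem_nlsS_le (s + 1) j ts (List.mem_reverse.mp hj)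
      simp only [decide_eq_true_eq]
      omega
    refine List.cons_eq_cons.mpr ⟨?_, ?_⟩
    · -- head
      rw [hrev, List.find?_append, hnone s le_rfl]
      by_cases h : PySem.Str.isIn "\n" t = true
      · simp only [if_pos h, Option.none_or, List.find?_cons, decide_true, le_refl]
        simp
      · simp only [if_neg h, List.find?_nil, Option.none_or]
        simp
    · -- tail
      have hlen : s + ((t :: ts).length : Int) = (s + 1) + (ts.length : Int) := by simp; omega
      rw [hlen, ih (s + 1) ((if PySem.Str.isIn "\n" t then 0 else c) + 1)]
      apply List.map_congr_left
      intro i hi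
      rw [PySem.List.mem_pyRange_one] at hi
      rw [hrev, List.find?_append]
      cases hfind : (nlsS (s + 1) ts).reverse.find? (fun j => decide (j ≤ i)) with
      | some j => rfl
      | none =>
        rw [Option.none_or]
        by_cases h : PySem.Str.isIn "\n" t = true
        · have hsi : s ≤ i := by omega
          simp only [if_pos h, List.find?_cons, hsi, decide_true]
          simp
          ring
        · simp only [if_neg h, List.find?_nil]
          ring

-- ===== VERDICT (by name: the statement is the Claim_ definition above) =====
theorem tokens_since_newline_spec : Claim_equal_tokens_since_newline := by
  intro tokens _
  unfold Spec_tokens_since_newline tokens_since_newline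
  rw [alt_eq, tokensA_go_eq tokens 0 0, zero_add]
  apply List.map_congr_left
  intro i _
  cases hfind : (nlsS 0 tokens).reverse.find? (fun j => decide (j ≤ i)) with
  | some j => simp
  | none => simp
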